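-- pv_equiv track=rewrite | github.com/kirilklein/python_optimal_matching | opmatch/util/match_utils.py | get_exp_nexp_dic
-- ===== SOURCE A (Python) =====
-- from typing import Dict, List, Union
--
-- def get_exp_nexp_dic(mincostFlow_dic:Dict):
--     """From mincostFlow_dic creates a dictionary with exposed patients as keys
--     and corresponding matched unexposed patients as values."""
--     exp_nexp_dic = dict()
--     for nexp in list(mincostFlow_dic.keys()):
--         for exp in list(mincostFlow_dic[nexp].keys()):
--             if exp not in exp_nexp_dic.keys():
--                 exp_nexp_dic[exp] = []
--             if mincostFlow_dic[nexp][exp]==1: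
--                 exp_nexp_dic[exp] = exp_nexp_dic[exp]+[nexp]
--     return exp_nexp_dic
-- ===== SOURCE B (Python) =====
-- def get_exp_nexp_dic(mincostFlow_dic):
--     """Flatten-then-group rewrite: collect the exposed ids (first-seen order) and
--     the flat list of matched (exposed, unexposed) edges, then group by key."""
--     keys = dict.fromkeys(exp for inner in mincostFlow_dic.values() for exp in inner)
--     pairs = [(exp, nexp) for nexp, inner in mincostFlow_dic.items()
--              for exp, v in inner.items() if v == 1]
--     return {exp: [n for e, n in pairs if e == exp] for exp in keys}
-- ===== Notes on version B (the rewrite author's own statement) =====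
-- stated objective: alternative
-- what changed: A builds the result dict incrementally inside one interleaved nested pass, creating keys and extending value lists by quadratic list concatenation as it goes; B never mutates a dict while scanning: it flattens the input into an ordered key list and a flat list of matched (exposed, unexposed) edges, then groups the edges per key in a final comprehension.
import Mathlib
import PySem

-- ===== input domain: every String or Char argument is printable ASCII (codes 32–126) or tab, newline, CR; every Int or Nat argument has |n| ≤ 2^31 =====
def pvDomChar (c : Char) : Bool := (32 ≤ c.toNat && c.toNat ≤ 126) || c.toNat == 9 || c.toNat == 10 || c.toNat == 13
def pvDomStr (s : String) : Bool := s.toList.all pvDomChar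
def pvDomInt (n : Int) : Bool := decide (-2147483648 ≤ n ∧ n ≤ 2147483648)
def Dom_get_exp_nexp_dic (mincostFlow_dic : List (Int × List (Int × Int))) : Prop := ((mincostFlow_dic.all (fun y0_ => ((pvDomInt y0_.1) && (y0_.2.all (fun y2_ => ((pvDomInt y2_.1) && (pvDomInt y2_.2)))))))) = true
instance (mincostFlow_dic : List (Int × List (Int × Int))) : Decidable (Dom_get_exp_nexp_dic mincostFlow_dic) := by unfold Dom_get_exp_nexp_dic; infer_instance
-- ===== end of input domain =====

-- B replaces A's interleaved dict-mutating nested pass by flatten (ordered keys +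
-- flat matched-edge list) then group-by-key, avoiding per-match list concatenation.


-- ===== PORT A =====
def get_exp_nexp_dic (mincostFlow_dic : List (Int × List (Int × Int))) : List (Int × List Int) :=
  (mincostFlow_dic.foldl (fun acc p =>
      p.2.foldl (fun acc q =>
        let acc1 := if acc.contains q.1 then acc else acc.insert q.1 ([] : List Int)
        if q.2 = 1 then acc1.insert q.1 (acc1.getD q.1 [] ++ [p.1]) else acc1) acc)
    PySem.Dict.empty).items

-- ===== PORT B =====
def get_exp_nexp_dic_alt (mincostFlow_dic : List (Int × List (Int × Int))) : List (Int × List Int) :=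
  let keys := PySem.List.dedup (mincostFlow_dic.flatMap (fun p => p.2.map (fun q => q.1)))
  let pairs := mincostFlow_dic.flatMap (fun p =>
      (p.2.filter (fun q => q.2 == 1)).map (fun q => (q.1, p.1)))
  (keys.foldl (fun d e =>
      d.insert e ((pairs.filter (fun pr => pr.1 == e)).map (fun pr => pr.2)))
    PySem.Dict.empty).items

-- ===== PRECONDITION & SPEC =====
def Spec_get_exp_nexp_dic (mincostFlow_dic : List (Int × List (Int × Int))) (out : List (Int × List Int)) : Prop := out = get_exp_nexp_dic_alt mincostFlow_dic
instance (mincostFlow_dic : List (Int × List (Int × Int))) (out : List (Int × List Int)) : Decidable (Spec_get_exp_nexp_dic mincostFlow_dic out) := by unfold Spec_get_exp_nexp_dic; infer_instance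

-- ===== CLAIM (what is proved, stated in full; the proofs are below) =====
def Claim_equal_get_exp_nexp_dic : Prop := ∀ (mincostFlow_dic : List (Int × List (Int × Int))), Dom_get_exp_nexp_dic mincostFlow_dic → Spec_get_exp_nexp_dic mincostFlow_dic (get_exp_nexp_dic mincostFlow_dic)

-- ===== LEMMAS AND PROOFS =====

-- A's inner loop body, over flattened (nexp, exp, v) triples.
def pvStepA (d : PySem.Dict Int (List Int)) (t : Int × Int × Int) : PySem.Dict Int (List Int) :=
  let d1 := if d.contains t.2.1 then d else d.insert t.2.1 []
  if t.2.2 = 1 then d1.insert t.2.1 (d1.getD t.2.1 [] ++ [t.1]) else d1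

def pvTriples (m : List (Int × List (Int × Int))) : List (Int × Int × Int) :=
  m.flatMap (fun p => p.2.map (fun q => (p.1, q.1, q.2)))

-- exposed keys in first-encounter order, and the matched unexposed ids for a key
def pvKeys (l : List (Int × Int × Int)) : List Int :=
  PySem.List.dedup (l.map (fun t => t.2.1))

def pvVal (l : List (Int × Int × Int)) (e : Int) : List Int :=
  (((l.filter (fun t => t.2.2 == 1)).map (fun t => (t.2.1, t.1))).filter
      (fun pr => pr.1 == e)).map (fun pr => pr.2)

theorem pvFoldFlat (F : PySem.Dict Int (List Int) → Int × Int × Int → PySem.Dict Int (List Int))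
    (m : List (Int × List (Int × Int))) (d : PySem.Dict Int (List Int)) :
    m.foldl (fun d p => p.2.foldl (fun d q => F d (p.1, q.1, q.2)) d) d = (pvTriples m).foldl F d := by
  induction m generalizing d with
  | nil => rfl
  | cons p m ih =>
    simp only [pvTriples, List.flatMap_cons, List.foldl_append, List.foldl_cons, List.foldl_map]
    exact ih _

theorem pv_dedup_append (xs : List Int) (x : Int) :
    PySem.List.dedup (xs ++ [x]) =
      if x ∈ PySem.List.dedup xs then PySem.List.dedup xs else PySem.List.dedup xs ++ [x] := by
  rw [PySem.List.dedup_eq_ofList, PySem.List.dedup_eq_ofList, PySem.Set.ofList_eq_foldl,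
      PySem.Set.ofList_eq_foldl, List.foldl_append, List.foldl_cons, List.foldl_nil]
  show PySem.Set.add _ x = _
  rw [PySem.Set.add]
  split_ifs with h1 h2 h2
  · rfl
  · exact absurd ((PySem.Set.contains_iff _ _).mp h1) h2
  · exact absurd ((PySem.Set.contains_iff _ _).mpr h2) h1
  · rfl

theorem pvKeys_append (l : List (Int × Int × Int)) (t : Int × Int × Int) :
    pvKeys (l ++ [t]) = if t.2.1 ∈ pvKeys l then pvKeys l else pvKeys l ++ [t.2.1] := by
  simp only [pvKeys, List.map_append, List.map_cons, List.map_nil]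
  exact pv_dedup_append _ _

theorem pvVal_append (l : List (Int × Int × Int)) (t : Int × Int × Int) (e : Int) :
    pvVal (l ++ [t]) e = pvVal l e ++ (if t.2.2 = 1 ∧ t.2.1 = e then [t.1] else []) := by
  simp only [pvVal, List.filter_append, List.map_append]
  congr 1
  by_cases hv : t.2.2 = 1 <;> by_cases he : t.2.1 = e <;>
    simp [hv, he]

theorem pvVal_of_not_mem (l : List (Int × Int × Int)) (e : Int)
    (h : e ∉ l.map (fun t => t.2.1)) : pvVal l e = [] := by
  simp only [pvVal, List.map_eq_nil_iff, List.filter_eq_nil_iff]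
  intro pr hpr
  simp only [List.mem_map, List.mem_filter] at hpr
  obtain ⟨t, ⟨ht, _⟩, rfl⟩ := hpr
  simp only [beq_iff_eq]
  intro hEq
  exact h (hEq ▸ List.mem_map_of_mem ht)

theorem pv_main (l : List (Int × Int × Int)) :
    (l.foldl pvStepA PySem.Dict.empty).items = (pvKeys l).map (fun e => (e, pvVal l e)) := by
  induction l using List.reverseRecOn with
  | nil => rfl
  | append_singleton l t ih =>
    obtain ⟨n, e0, v⟩ := t
    rw [List.foldl_append, List.foldl_cons, List.foldl_nil]
    set D := l.foldl pvStepA PySem.Dict.empty with hD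
    have hkeys : D.keys = pvKeys l := by
      simp [PySem.Dict.keys, ih, List.map_map, Function.comp_def]
    have hnd : D.keys.Nodup := by rw [hkeys]; exact PySem.List.nodup_dedup _
    have hcontk : D.contains e0 = true ↔ e0 ∈ pvKeys l := by
      rw [PySem.Dict.contains_iff_mem_keys, hkeys]
    rw [pvKeys_append]
    simp only [pvStepA]
    by_cases hmem : e0 ∈ pvKeys l
    · -- key already present: A's "create empty" branch is skipped
      have hc : D.contains e0 = true := hcontk.mpr hmem
      have hval : D.getD e0 [] = pvVal l e0 :=
        PySem.Dict.getD_of_mem_items D (by rw [ih]; exact List.mem_map_of_mem hmem) hnd []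
      rw [if_pos hmem, hc]
      simp only [if_true]
      by_cases hv : v = 1
      · rw [if_pos hv, PySem.Dict.items_insert_of_contains _ _ hc, ih, List.map_map, hval]
        apply List.map_congr_left
        intro e he
        by_cases hee : e = e0
        · subst hee
          simp [pvVal_append, hv]
        · have hee2 : ¬ (e0 = e) := fun h => hee h.symm
          simp [pvVal_append, hee, hee2]
      · rw [if_neg hv, ih]
        apply List.map_congr_left
        intro e he
        have h2 : pvVal (l ++ [(n, e0, v)]) e = pvVal l e := by
          rw [pvVal_append]; simp [hv]
        rw [h2]
    · -- fresh key: A appends (e0, []) then possibly extends it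
      have hc : D.contains e0 = false :=
        Bool.eq_false_iff.mpr (fun h => hmem (hcontk.mp h))
      have hnotmap : e0 ∉ l.map (fun t => t.2.1) := by
        intro h; exact hmem ((PySem.List.mem_dedup _ _).mpr h)
      have hval0 : pvVal l e0 = [] := pvVal_of_not_mem l e0 hnotmap
      rw [if_neg hmem, hc]
      simp only [Bool.false_eq_true, if_false]
      rw [List.map_append]
      have hmapold : (pvKeys l).map (fun e => (e, pvVal (l ++ [(n, e0, v)]) e))
          = (pvKeys l).map (fun e => (e, pvVal l e)) := by
        apply List.map_congr_left
        intro e he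
        have hee : ¬ (e0 = e) := fun h => hmem (h ▸ he)
        rw [pvVal_append]; simp [hee]
      by_cases hv : v = 1
      · rw [if_pos hv, PySem.Dict.getD_insert_self, PySem.Dict.insert_insert_self,
            PySem.Dict.items_insert_of_not_contains _ _ hc, ih, hmapold]
        simp [pvVal_append, hv, hval0]
      · rw [if_neg hv, PySem.Dict.items_insert_of_not_contains _ _ hc, ih, hmapold]
        simp [pvVal_append, hv, hval0]

theorem pv_keys_flat (m : List (Int × List (Int × Int))) :
    m.flatMap (fun p => p.2.map (fun q => q.1)) = (pvTriples m).map (fun t => t.2.1) := by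
  simp [pvTriples, List.map_flatMap, List.map_map, Function.comp_def]

theorem pv_pairs_flat (m : List (Int × List (Int × Int))) :
    m.flatMap (fun p => (p.2.filter (fun q => q.2 == 1)).map (fun q => (q.1, p.1)))
      = ((pvTriples m).filter (fun t => t.2.2 == 1)).map (fun t => (t.2.1, t.1)) := by
  induction m with
  | nil => rfl
  | cons p m ih =>
    simp only [pvTriples, List.flatMap_cons, List.filter_append, List.map_append,
      List.filter_map, List.map_map] at *
    rw [ih]
    rfl

-- ===== VERDICT (by name: the statement is the Claim_ definition above) =====
theorem get_exp_nexp_dic_spec : Claim_equal_get_exp_nexp_dic := by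
  intro m _
  show (m.foldl (fun d p => p.2.foldl (fun d q => pvStepA d (p.1, q.1, q.2)) d) PySem.Dict.empty).items = _
  rw [pvFoldFlat pvStepA, pv_main]
  show _ = (((PySem.List.dedup (m.flatMap (fun p => p.2.map (fun q => q.1)))).foldl (fun d e =>
      d.insert e (((m.flatMap (fun p => (p.2.filter (fun q => q.2 == 1)).map (fun q => (q.1, p.1)))).filter
        (fun pr => pr.1 == e)).map (fun pr => pr.2))) PySem.Dict.empty).items)
  rw [pv_keys_flat, pv_pairs_flat]
  have h := PySem.Dict.items_foldl_insert_fresh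
    (PySem.List.dedup ((pvTriples m).map (fun t => t.2.1))) (fun e => e)
    (fun e => (((((pvTriples m).filter (fun t => t.2.2 == 1)).map (fun t => (t.2.1, t.1))).filter
        (fun pr => pr.1 == e)).map (fun pr => pr.2)))
    PySem.Dict.empty
    (fun a _ => PySem.Dict.contains_empty a)
    (by simp)
  simp only [h]
  simp [pvKeys, pvVal, PySem.Dict.empty]
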